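-- pv_equiv track=rewrite | github.com/YashIndane/codewars-solutions | python/Is_There_an_Odd_Bit?.py | any_odd
-- ===== SOURCE A (Python) =====
-- def any_odd(x):
--     # Write code here...
--     w = bin(x).replace("0b", "")[::-1]
--     for i ,k in enumerate(w):
--         if i == 0:
--             pass
--         else:
--             if i%2 == 1 and k == "1":
--                 return True
--     return False
-- ===== SOURCE B (Python) =====
-- def any_odd(x):
--     n = abs(x)
--     mask = 0xAAAAAAAA
--     while mask < n:
--         mask = (mask << 32) | 0xAAAAAAAA
--     return bool(n & mask)
-- ===== Notes on version B (the rewrite author's own statement) =====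
-- stated objective: alternative
-- what changed: B replaces A's per-character scan of the reversed binary string by one bitwise AND of abs(x) with an odd-bit mask 0xAAAAAAAA grown (shift-and-or) until it covers the number.
import Mathlib
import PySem

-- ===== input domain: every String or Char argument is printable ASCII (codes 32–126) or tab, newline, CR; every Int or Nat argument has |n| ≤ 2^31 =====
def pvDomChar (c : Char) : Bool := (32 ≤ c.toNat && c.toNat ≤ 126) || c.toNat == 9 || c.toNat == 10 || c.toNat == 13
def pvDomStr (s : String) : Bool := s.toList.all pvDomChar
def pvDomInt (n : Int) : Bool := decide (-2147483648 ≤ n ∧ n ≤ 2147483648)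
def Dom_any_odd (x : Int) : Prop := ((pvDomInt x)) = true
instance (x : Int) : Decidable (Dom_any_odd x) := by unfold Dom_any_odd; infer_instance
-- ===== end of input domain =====

-- B replaces A's per-character scan of the reversed binary string by a single
-- bitwise AND with an odd-bit mask grown to cover the number (objective: alternative).

-- ===== PORT A =====
-- binary digits of n, least-significant first (empty for 0)
def binDigits (n : Nat) : List Char :=
  if n = 0 then [] else (if n % 2 = 1 then '1' else '0') :: binDigits (n / 2)

-- bin(x).replace("0b", "") as a list of chars: optional '-', then digits MSB-first
-- (digits are produced LSB-first by binDigits and reversed here — exact)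
def binStr (x : Int) : List Char :=
  (if x < 0 then ['-'] else []) ++
    (if x.natAbs = 0 then ['0'] else (binDigits x.natAbs).reverse)

-- the 'for i, k in enumerate(w)' loop with its early return
def loopA : Nat → List Char → Bool
  | _, [] => false
  | i, k :: r =>
    if i = 0 then loopA (i + 1) r
    else if i % 2 = 1 ∧ k = '1' then true
    else loopA (i + 1) r

def any_odd (x : Int) : Bool := loopA 0 (binStr x).reverse

-- ===== PORT B =====
-- the 'while mask < n' loop; returns the final mask
def bMask (n mask : Nat) : Nat :=
  if mask < n then bMask n ((mask <<< 32) ||| 0xAAAAAAAA) else mask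
termination_by n - mask
decreasing_by
  have h1 : mask <<< 32 ≤ (mask <<< 32) ||| 0xAAAAAAAA := Nat.left_le_or
  have h2 : (0xAAAAAAAA : Nat) ≤ (mask <<< 32) ||| 0xAAAAAAAA := Nat.right_le_or
  omega

def any_odd_alt (x : Int) : Bool :=
  let n := x.natAbs
  let mask := bMask n 0xAAAAAAAA
  decide (n &&& mask ≠ 0)

-- ===== PRECONDITION & SPEC =====
def Spec_any_odd (x : Int) (out : Bool) : Prop := out = any_odd_alt x
instance (x : Int) (out : Bool) : Decidable (Spec_any_odd x out) := by unfold Spec_any_odd; infer_instance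

-- ===== CLAIM (what is proved, stated in full; the proofs are below) =====
def Claim_equal_any_odd : Prop := ∀ (x : Int), Dom_any_odd x → Spec_any_odd x (any_odd x)

-- ===== LEMMAS AND PROOFS =====

-- A's loop returns true iff some position of odd absolute index holds '1'
theorem loopA_iff (l : List Char) (i : Nat) :
    loopA i l = true ↔ ∃ j, (i + j) % 2 = 1 ∧ l[j]? = some '1' := by
  induction l generalizing i with
  | nil => simp [loopA]
  | cons k r ih =>
    rw [loopA]
    split_ifs with hi hk
    · rw [ih]
      constructor
      · rintro ⟨j, hj, hg⟩
        exact ⟨j + 1, by omega, by simpa using hg⟩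
      · rintro ⟨j, hj, hg⟩
        match j with
        | 0 => omega
        | j + 1 => exact ⟨j, by omega, by simpa using hg⟩
    · constructor
      · intro _
        exact ⟨0, by omega, by simp [hk.2]⟩
      · intro _
        rfl
    · rw [ih]
      constructor
      · rintro ⟨j, hj, hg⟩
        exact ⟨j + 1, by omega, by simpa using hg⟩
      · rintro ⟨j, hj, hg⟩
        match j with
        | 0 =>
          simp only [List.getElem?_cons_zero, Option.some.injEq] at hg
          exact absurd ⟨by omega, hg⟩ hk
        | j + 1 => exact ⟨j, by omega, by simpa using hg⟩

-- binDigits indexed = testBit (also for out-of-range indices: both sides false)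
theorem binDigits_getElem (n j : Nat) :
    ((binDigits n)[j]? = some '1') ↔ n.testBit j = true := by
  induction j generalizing n with
  | zero =>
    rw [binDigits]
    by_cases h : n = 0
    · simp [h]
    · simp only [if_neg h, List.getElem?_cons_zero, Option.some.injEq, Nat.testBit_zero]
      by_cases h2 : n % 2 = 1
      · simp [h2]
      · simp [h2]
  | succ j ih =>
    rw [binDigits]
    by_cases h : n = 0
    · simp [h]
    · simp only [if_neg h, List.getElem?_cons_succ]
      rw [ih, Nat.testBit_add_one]

-- A's value: some odd bit of |x| is set
theorem anyOdd_char (x : Int) :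
    any_odd x = true ↔ ∃ j, j % 2 = 1 ∧ x.natAbs.testBit j = true := by
  unfold any_odd binStr
  rcases lt_or_ge x 0 with hx | hx
  · have hn : x.natAbs ≠ 0 := by
      intro h; omega
    simp only [if_pos hx, if_neg hn, List.reverse_append, List.reverse_reverse,
      List.reverse_cons, List.reverse_nil, List.nil_append, loopA_iff, Nat.zero_add]
    constructor
    · rintro ⟨j, hj, hg⟩
      refine ⟨j, hj, ?_⟩
      rw [← binDigits_getElem]
      rcases lt_or_ge j (binDigits x.natAbs).length with hlen | hlen
      · rwa [List.getElem?_append_left hlen] at hg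
      · rw [List.getElem?_append_right hlen] at hg
        rcases Nat.lt_or_ge (j - (binDigits x.natAbs).length) 1 with h1 | h1
        · interval_cases h : (j - (binDigits x.natAbs).length)
          simp at hg
        · rw [List.getElem?_eq_none (by simpa using h1)] at hg
          exact absurd hg (by simp)
    · rintro ⟨j, hj, hb⟩
      rw [← binDigits_getElem] at hb
      have hlen : j < (binDigits x.natAbs).length := by
        by_contra hc
        rw [List.getElem?_eq_none (by omega)] at hb
        exact absurd hb (by simp)
      exact ⟨j, hj, by rwa [List.getElem?_append_left hlen]⟩
  · have hx0 : ¬ x < 0 := by omega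
    by_cases hn : x.natAbs = 0
    · simp only [if_neg hx0, List.nil_append, hn, loopA_iff, Nat.zero_add]
      constructor
      · rintro ⟨j, hj, hg⟩
        rcases Nat.lt_or_ge j 1 with h1 | h1
        · interval_cases j
          simp at hg
        · rw [List.getElem?_eq_none (by simpa using h1)] at hg
          exact absurd hg (by simp)
      · rintro ⟨j, hj, hb⟩
        simp [Nat.testBit] at hb
    · simp only [if_neg hx0, if_neg hn, List.nil_append, List.reverse_reverse,
        loopA_iff, Nat.zero_add]
      constructor
      · rintro ⟨j, hj, hg⟩
        exact ⟨j, hj, (binDigits_getElem _ _).mp hg⟩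
      · rintro ⟨j, hj, hb⟩
        exact ⟨j, hj, (binDigits_getElem _ _).mpr hb⟩

-- on the domain the mask loop exits at once
theorem bMask_small (n : Nat) (h : n ≤ 2863311530) : bMask n 0xAAAAAAAA = 0xAAAAAAAA := by
  rw [bMask]
  simp only [if_neg (by omega : ¬ (0xAAAAAAAA : Nat) < n)]

-- the mask's bits are exactly the odd positions below 32
theorem mask_testBit (j : Nat) : (0xAAAAAAAA : Nat).testBit j = true ↔ (j % 2 = 1 ∧ j < 32) := by
  rcases Nat.lt_or_ge j 32 with hj | hj
  · constructor
    · intro h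
      refine ⟨?_, hj⟩
      interval_cases j <;> first | rfl | (exfalso; revert h; decide)
    · rintro ⟨h, -⟩
      interval_cases j <;> first | decide | omega
  · rw [Nat.testBit_eq_false_of_lt]
    · simp; omega
    · calc (0xAAAAAAAA : Nat) < 2 ^ 32 := by norm_num
        _ ≤ 2 ^ j := Nat.pow_le_pow_right (by norm_num) hj

-- landing the odd-bit existence on the AND with the mask
theorem land_mask_char (n : Nat) (h : n ≤ 2147483648) :
    (n &&& 0xAAAAAAAA ≠ 0) ↔ ∃ j, j % 2 = 1 ∧ n.testBit j = true := by
  constructor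
  · intro hne
    by_contra hno
    push Not at hno
    apply hne
    apply Nat.eq_of_testBit_eq
    intro j
    rw [Nat.zero_testBit]
    rw [Nat.testBit_and]
    by_cases hb : n.testBit j = true
    · by_cases hm : (0xAAAAAAAA : Nat).testBit j = true
      · exact absurd hb (by simpa [((mask_testBit j).mp hm).1] using hno j ((mask_testBit j).mp hm).1)
      · simp [Bool.eq_false_iff.mpr hm]
    · simp [Bool.eq_false_iff.mpr hb]
  · rintro ⟨j, hj, hb⟩
    have hjlt : j < 32 := by
      by_contra hc
      rw [Nat.testBit_eq_false_of_lt] at hb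
      · exact absurd hb (by simp)
      · calc n ≤ 2147483648 := h
          _ < 2 ^ 32 := by norm_num
          _ ≤ 2 ^ j := Nat.pow_le_pow_right (by norm_num) (by omega)
    intro h0
    have : (n &&& 0xAAAAAAAA).testBit j = true := by
      rw [Nat.testBit_and, hb, (mask_testBit j).mpr ⟨hj, hjlt⟩]; rfl
    rw [h0] at this
    simp at this

-- ===== VERDICT (by name: the statement is the Claim_ definition above) =====
theorem any_odd_spec : Claim_equal_any_odd := by
  intro x hx
  unfold Spec_any_odd
  have hdom : x.natAbs ≤ 2147483648 := by
    unfold Dom_any_odd pvDomInt at hx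
    simp only [decide_eq_true_eq] at hx
    omega
  show any_odd x = decide (x.natAbs &&& bMask x.natAbs 0xAAAAAAAA ≠ 0)
  rw [bMask_small x.natAbs (by omega)]
  rw [Bool.eq_iff_iff, decide_eq_true_eq, anyOdd_char, land_mask_char _ hdom]
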